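-- pv_equiv track=rewrite | github.com/JacksonK11/The_Forge | pipeline/nodes/layer_generator.py | _strip_duplicate_imports
-- ===== SOURCE A (Python) =====
-- def _strip_duplicate_imports(part1: str, part2: str) -> str:
--     """
--     Merge Part 1 and Part 2, stripping duplicate import lines from the
--     top of Part 2 to prevent redefinition errors.
--     """
--     part1_imports: set[str] = set()
--     for line in part1.splitlines():
--         stripped = line.strip()
--         if stripped.startswith("import ") or stripped.startswith("from "):
--             part1_imports.add(stripped)
--
--     part2_lines = part2.splitlines()
--     filtered: list[str] = []
--     past_header = False
--
--     for line in part2_lines: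
--         stripped = line.strip()
--         if not past_header:
--             if not stripped:
--                 continue  # skip leading blank lines
--             if stripped.startswith("import ") or stripped.startswith("from "):
--                 if stripped in part1_imports:
--                     continue  # skip duplicate import
--                 filtered.append(line)
--                 continue
--             past_header = True
--         filtered.append(line)
--
--     return part1.rstrip() + "\n\n\n" + "\n".join(filtered)
-- ===== SOURCE B (Python) =====
-- def _strip_duplicate_imports(part1: str, part2: str) -> str:
--     part1_imports = {
--         s for line in part1.splitlines()
--         if (s := line.strip()).startswith(("import ", "from "))
--     }
--     lines = part2.splitlines()
--     idx = next(
--         (i for i, l in enumerate(lines)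
--          if l.strip() and not l.strip().startswith(("import ", "from "))),
--         len(lines),
--     )
--     header = [
--         l for l in lines[:idx]
--         if l.strip() and l.strip() not in part1_imports
--     ]
--     return part1.rstrip() + "\n\n\n" + "\n".join(header + lines[idx:])
-- ===== Notes on version B (the rewrite author's own statement) =====
-- stated objective: simpler
-- what changed: Replaces A's past_header flag loop over part2 with computing the header boundary index once, then filtering the header slice by a comprehension and appending the body slice verbatim.
import Mathlib
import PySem

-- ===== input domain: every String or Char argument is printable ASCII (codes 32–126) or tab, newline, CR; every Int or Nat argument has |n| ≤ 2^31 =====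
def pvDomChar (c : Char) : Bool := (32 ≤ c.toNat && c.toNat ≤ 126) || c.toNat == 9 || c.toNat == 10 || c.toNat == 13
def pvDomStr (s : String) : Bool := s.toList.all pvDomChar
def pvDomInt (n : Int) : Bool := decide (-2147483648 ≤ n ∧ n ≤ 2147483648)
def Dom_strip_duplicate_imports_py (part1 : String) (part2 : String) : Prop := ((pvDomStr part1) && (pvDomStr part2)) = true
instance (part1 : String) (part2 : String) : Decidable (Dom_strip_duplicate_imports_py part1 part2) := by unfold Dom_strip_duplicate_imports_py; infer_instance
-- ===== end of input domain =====

-- B replaces A's past_header flag loop by computing the header boundary index and slicing; objective: simpler decomposition.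

-- ===== PORT A =====
def pvIsImport (s : List Char) : Bool :=
  PySem.Chars.startswith s "import ".toList || PySem.Chars.startswith s "from ".toList

def pvImportsA (part1 : List Char) : PySem.Set (List Char) :=
  (PySem.Chars.splitlines part1).foldl
    (fun acc line =>
      let s := PySem.Chars.strip line
      if pvIsImport s then PySem.Set.add acc s else acc)
    PySem.Set.empty

def pvLoopA (imports : PySem.Set (List Char)) :
    List (List Char) → Bool → List (List Char)
  | [], _ => []
  | line :: rest, past =>
    if past then line :: pvLoopA imports rest true
    else
      let s := PySem.Chars.strip line
      if s.isEmpty then pvLoopA imports rest false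
      else if pvIsImport s then
        if PySem.Set.contains imports s then pvLoopA imports rest false
        else line :: pvLoopA imports rest false
      else line :: pvLoopA imports rest true

def strip_duplicate_imports_py (part1 : String) (part2 : String) : String :=
  let imports := pvImportsA part1.toList
  let filtered := pvLoopA imports (PySem.Chars.splitlines part2.toList) false
  String.ofList (PySem.Chars.rstrip part1.toList ++ "\n\n\n".toList ++
    PySem.Chars.join "\n".toList filtered)

-- ===== PORT B =====
def pvImportsB (part1 : List Char) : PySem.Set (List Char) :=
  PySem.Set.ofList
    (((PySem.Chars.splitlines part1).map PySem.Chars.strip).filter pvIsImport)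

def strip_duplicate_imports_py_alt (part1 : String) (part2 : String) : String :=
  let imports := pvImportsB part1.toList
  let lines := PySem.Chars.splitlines part2.toList
  let idx := lines.findIdx
    (fun l => !(PySem.Chars.strip l).isEmpty && !pvIsImport (PySem.Chars.strip l))
  let header := (lines.take idx).filter
    (fun l => !(PySem.Chars.strip l).isEmpty &&
              !PySem.Set.contains imports (PySem.Chars.strip l))
  String.ofList (PySem.Chars.rstrip part1.toList ++ "\n\n\n".toList ++
    PySem.Chars.join "\n".toList (header ++ lines.drop idx))

-- ===== PRECONDITION & SPEC =====
def Spec_strip_duplicate_imports_py (part1 : String) (part2 : String) (out : String) : Prop := out = strip_duplicate_imports_py_alt part1 part2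
instance (part1 : String) (part2 : String) (out : String) : Decidable (Spec_strip_duplicate_imports_py part1 part2 out) := by unfold Spec_strip_duplicate_imports_py; infer_instance

-- ===== CLAIM (what is proved, stated in full; the proofs are below) =====
def Claim_equal_strip_duplicate_imports_py : Prop := ∀ (part1 : String) (part2 : String), Dom_strip_duplicate_imports_py part1 part2 → Spec_strip_duplicate_imports_py part1 part2 (strip_duplicate_imports_py part1 part2)

-- ===== LEMMAS AND PROOFS =====

-- A's set-building fold equals B's set comprehension.
theorem imports_eq_aux (l : List (List Char)) (acc : PySem.Set (List Char)) :
    l.foldl (fun acc line =>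
        let s := PySem.Chars.strip line
        if pvIsImport s then PySem.Set.add acc s else acc) acc
      = ((l.map PySem.Chars.strip).filter pvIsImport).foldl PySem.Set.add acc := by
  induction l generalizing acc with
  | nil => rfl
  | cons x xs ih =>
    simp only [List.foldl_cons, List.map_cons, List.filter_cons]
    by_cases h : pvIsImport (PySem.Chars.strip x)
    · simp [h, ih]
    · simp [h, ih]

theorem imports_eq (p : List Char) : pvImportsA p = pvImportsB p := by
  unfold pvImportsA pvImportsB
  rw [PySem.Set.ofList_eq_foldl, imports_eq_aux]
  rfl

-- once past the header, A copies everything verbatim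
theorem loopA_true (imp : PySem.Set (List Char)) (l : List (List Char)) :
    pvLoopA imp l true = l := by
  induction l with
  | nil => rfl
  | cons x xs ih => simp [pvLoopA, ih]

-- A's flag loop equals filtered header ++ body at the boundary index
theorem loopA_eq (imp : PySem.Set (List Char)) (l : List (List Char)) :
    pvLoopA imp l false =
      (l.take (l.findIdx (fun s =>
          !(PySem.Chars.strip s).isEmpty && !pvIsImport (PySem.Chars.strip s)))).filter
        (fun s => !(PySem.Chars.strip s).isEmpty &&
                  !PySem.Set.contains imp (PySem.Chars.strip s)) ++
      l.drop (l.findIdx (fun s =>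
          !(PySem.Chars.strip s).isEmpty && !pvIsImport (PySem.Chars.strip s))) := by
  induction l with
  | nil => rfl
  | cons x xs ih =>
    by_cases he : (PySem.Chars.strip x).isEmpty
    · -- blank line: skipped by A, filtered out by B, findIdx moves on
      rw [List.findIdx_cons]
      simp [pvLoopA, he, ih]
    · by_cases hi : pvIsImport (PySem.Chars.strip x)
      · rw [List.findIdx_cons]
        by_cases hc : PySem.Chars.strip x ∈ imp
        · simp [pvLoopA, he, hi, hc, ih]
        · simp [pvLoopA, he, hi, hc, ih]
      · -- boundary line: findIdx = 0, A switches past_header and copies the rest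
        rw [List.findIdx_cons]
        simp [pvLoopA, he, hi, loopA_true]

-- ===== VERDICT (by name: the statement is the Claim_ definition above) =====
theorem strip_duplicate_imports_py_spec : Claim_equal_strip_duplicate_imports_py := by
  intro part1 part2 _
  unfold Spec_strip_duplicate_imports_py
  simp only [strip_duplicate_imports_py, strip_duplicate_imports_py_alt]
  rw [imports_eq, loopA_eq]
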